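-- pv_equiv track=rewrite | github.com/segalmax/ner_attributes | misc_preprocessing_python3.py | get_iob_labels
-- ===== SOURCE A (Python) =====
-- import itertools
--
-- def get_iob_labels(sent_words_pos_labels):
--     words_list, pos_list, labels_list = zip(*sent_words_pos_labels)
--     grouped_list = [list(grp) for k, grp in itertools.groupby(labels_list)]
--
--     converted_to_iob_list = []
--     for group in grouped_list:
--         if set(group) == set('O'):
--             converted_to_iob_list.extend(group)
--         else:
--             group = list(map(lambda ix_tuple: decide_iob_prefix(ix_tuple), list(enumerate(group))))
--             converted_to_iob_list.extend(group)
--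
--     assert len(words_list) == len(pos_list) == len(converted_to_iob_list)
--     return list(zip(words_list, pos_list, converted_to_iob_list))
--
-- def decide_iob_prefix(i_x_tuple):
--     i, x = i_x_tuple
--     return 'B-{}'.format(x) if i == 0 else 'I-{}'.format(x)
-- ===== SOURCE B (Python) =====
-- def get_iob_labels(sent_words_pos_labels):
--     words_list, pos_list, labels_list = zip(*sent_words_pos_labels)
--     iob = []
--     prev = None
--     for x in labels_list:
--         if x == 'O':
--             iob.append('O')
--         elif prev == x:
--             iob.append('I-' + x)
--         else:
--             iob.append('B-' + x)
--         prev = x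
--     return list(zip(words_list, pos_list, iob))
-- ===== Notes on version B (the rewrite author's own statement) =====
-- stated objective: simpler
-- what changed: Replaced itertools.groupby with explicit group materialization, per-group set comparison and enumerate-based prefixing by a single stateful pass over the labels that tracks the previous label and decides O/B-/I- per element.
import Mathlib
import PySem

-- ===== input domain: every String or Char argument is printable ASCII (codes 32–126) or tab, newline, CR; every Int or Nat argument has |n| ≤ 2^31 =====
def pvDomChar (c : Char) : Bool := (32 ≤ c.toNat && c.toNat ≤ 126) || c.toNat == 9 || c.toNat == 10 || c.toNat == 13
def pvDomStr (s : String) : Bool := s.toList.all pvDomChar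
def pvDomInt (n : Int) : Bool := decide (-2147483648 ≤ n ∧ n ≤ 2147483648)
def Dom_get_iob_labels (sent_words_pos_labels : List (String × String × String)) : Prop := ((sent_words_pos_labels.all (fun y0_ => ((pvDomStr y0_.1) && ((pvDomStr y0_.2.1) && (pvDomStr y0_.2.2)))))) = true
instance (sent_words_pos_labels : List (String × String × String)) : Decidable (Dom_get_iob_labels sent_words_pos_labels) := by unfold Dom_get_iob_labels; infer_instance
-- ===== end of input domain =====

-- B replaces groupby + per-group set test + enumerate prefixing by one stateful pass
-- tracking the previous label (objective: simpler).

-- ===== PORT A =====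
def decide_iob_prefix (i_x_tuple : Int × String) : String :=
  if i_x_tuple.1 = 0 then "B-" ++ i_x_tuple.2 else "I-" ++ i_x_tuple.2

-- itertools.groupby materialised to lists (keys discarded, as in A)
def pvGroupBy : List String → List (List String)
  | [] => []
  | x :: rest => (x :: rest.takeWhile (· == x)) :: pvGroupBy (rest.dropWhile (· == x))
termination_by l => l.length
decreasing_by
  simpa using Nat.lt_succ_of_le (List.length_dropWhile_le _ _)

def get_iob_labels (sent_words_pos_labels : List (String × String × String)) : List (String × String × String) :=
  let words_list := sent_words_pos_labels.map (·.1)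
  let pos_list := sent_words_pos_labels.map (·.2.1)
  let labels_list := sent_words_pos_labels.map (·.2.2)
  let grouped_list := pvGroupBy labels_list
  let converted_to_iob_list := grouped_list.foldl
    (fun acc group =>
      if PySem.Set.equal (PySem.Set.ofList group) (PySem.Set.ofList ["O"]) then
        acc ++ group
      else
        acc ++ (PySem.List.enumerate group).map decide_iob_prefix) []
  words_list.zip (pos_list.zip converted_to_iob_list)

-- ===== PORT B =====
-- the single pass over the labels, with the previous label as state
def pvIobPass : List String → Option String → List String
  | [], _ => []
  | x :: rest, prev =>
    (if x = "O" then "O" else if prev = some x then "I-" ++ x else "B-" ++ x)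
      :: pvIobPass rest (some x)

def get_iob_labels_alt (sent_words_pos_labels : List (String × String × String)) : List (String × String × String) :=
  let words_list := sent_words_pos_labels.map (·.1)
  let pos_list := sent_words_pos_labels.map (·.2.1)
  let labels_list := sent_words_pos_labels.map (·.2.2)
  words_list.zip (pos_list.zip (pvIobPass labels_list none))

-- ===== PRECONDITION & SPEC =====
-- Both Pythons unpack with zip(*…), which raises ValueError on the empty list; Pre_ excludes exactly that input.
def Pre_get_iob_labels (sent_words_pos_labels : List (String × String × String)) : Prop :=
  sent_words_pos_labels ≠ []
instance (sent_words_pos_labels : List (String × String × String)) : Decidable (Pre_get_iob_labels sent_words_pos_labels) := by unfold Pre_get_iob_labels; infer_instance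

def pvWitness_get_iob_labels : (List (String × String × String)) :=
  [("John", "NNP", "PER"), ("lives", "VBZ", "O"), ("in", "IN", "O"), ("New", "NNP", "LOC"), ("York", "NNP", "LOC")]

def Spec_get_iob_labels (sent_words_pos_labels : List (String × String × String)) (out : List (String × String × String)) : Prop := out = get_iob_labels_alt sent_words_pos_labels
instance (sent_words_pos_labels : List (String × String × String)) (out : List (String × String × String)) : Decidable (Spec_get_iob_labels sent_words_pos_labels out) := by unfold Spec_get_iob_labels; infer_instance

-- ===== CLAIM (what is proved, stated in full; the proofs are below) =====
def Claim_equal_get_iob_labels : Prop := ∀ (sent_words_pos_labels : List (String × String × String)), Dom_get_iob_labels sent_words_pos_labels → Pre_get_iob_labels sent_words_pos_labels → Spec_get_iob_labels sent_words_pos_labels (get_iob_labels sent_words_pos_labels)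

-- ===== LEMMAS AND PROOFS =====

-- A's per-group processing, named for the proof
def pvProcGroup (group : List String) : List String :=
  if PySem.Set.equal (PySem.Set.ofList group) (PySem.Set.ofList ["O"]) then group
  else (PySem.List.enumerate group).map decide_iob_prefix

lemma ofList_const {x : String} {g : List String} (h : ∀ y ∈ g, y = x) :
    PySem.Set.ofList (x :: g) = [x] := by
  induction g with
  | nil => simp [PySem.Set.ofList_cons, PySem.Set.discard]
  | cons y g ih =>
    have hy : y = x := h y (by simp)
    subst hy
    have ih' := ih (fun z hz => h z (by simp [hz]))
    rw [PySem.Set.ofList_cons] at ih' ⊢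
    rw [PySem.Set.ofList_cons, ih']
    simp [PySem.Set.discard]

lemma dropWhile_head_false {p : String → Bool} {l : List String} {y : String}
    (h : (l.dropWhile p).head? = some y) : p y = false := by
  induction l with
  | nil => simp [List.dropWhile] at h
  | cons a l ih =>
    rw [List.dropWhile_cons] at h
    split at h
    · exact ih h
    · simp only [List.head?_cons, Option.some.injEq] at h
      subst h
      simpa using ‹¬ p a = true›

lemma pass_shift {t : List String} {x : String} (h : ∀ y, t.head? = some y → y ≠ x) :
    pvIobPass t (some x) = pvIobPass t none := by
  cases t with
  | nil => rfl
  | cons y tt =>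
    have hy : y ≠ x := h y rfl
    simp [pvIobPass, Ne.symm hy]

lemma pass_const {g t : List String} {x : String} (h : ∀ y ∈ g, y = x) (hx : x ≠ "O") :
    pvIobPass (g ++ t) (some x) = g.map (fun y => "I-" ++ y) ++ pvIobPass t (some x) := by
  induction g with
  | nil => rfl
  | cons y g ih =>
    have hy : y = x := h y (by simp)
    subst hy
    simp [pvIobPass, hx, ih (fun z hz => h z (by simp [hz]))]

lemma pass_constO {g t : List String} (h : ∀ y ∈ g, y = "O") :
    pvIobPass (g ++ t) (some "O") = g ++ pvIobPass t (some "O") := by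
  induction g with
  | nil => rfl
  | cons y g ih =>
    have hy : y = "O" := h y (by simp)
    subst hy
    simp [pvIobPass, ih (fun z hz => h z (by simp [hz]))]

lemma enum_from_pos {g : List String} : ∀ k : Int, 0 < k →
    (PySem.List.enumerate g k).map decide_iob_prefix = g.map (fun y => "I-" ++ y) := by
  induction g with
  | nil => intro k _; rfl
  | cons y g ih =>
    intro k hk
    rw [PySem.List.enumerate_cons]
    simp only [List.map_cons, decide_iob_prefix]
    rw [if_neg (by omega), ih (k + 1) (by omega)]

lemma enum_const {g : List String} {x : String} :
    (PySem.List.enumerate (x :: g)).map decide_iob_prefix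
      = ("B-" ++ x) :: g.map (fun y => "I-" ++ y) := by
  rw [PySem.List.enumerate_cons]
  simp only [List.map_cons, decide_iob_prefix]
  rw [if_pos trivial, enum_from_pos (0 + 1) (by omega)]

lemma main_lemma : ∀ ls : List String, (pvGroupBy ls).flatMap pvProcGroup = pvIobPass ls none := by
  intro ls
  induction ls using pvGroupBy.induct with
  | case1 => simp [pvGroupBy, pvIobPass]
  | case2 x rest ih =>
    rw [pvGroupBy, List.flatMap_cons, ih]
    have htw : ∀ y ∈ rest.takeWhile (· == x), y = x := by
      intro y hy
      simpa using List.mem_takeWhile_imp hy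
    have hdw : ∀ y, (rest.dropWhile (· == x)).head? = some y → y ≠ x := by
      intro y hy
      simpa using dropWhile_head_false hy
    conv_rhs => rw [← List.takeWhile_append_dropWhile (p := (· == x)) (l := rest)]
    by_cases hx : x = "O"
    · subst hx
      have hset : PySem.Set.ofList ("O" :: rest.takeWhile (· == "O")) = ["O"] := ofList_const htw
      rw [pvProcGroup, if_pos (by rw [hset]; rfl)]
      show "O" :: rest.takeWhile (· == "O") ++ _ = pvIobPass ("O" :: (_ ++ _)) none
      rw [pvIobPass, if_pos rfl, pass_constO htw, pass_shift hdw]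
      simp
    · have hset : PySem.Set.ofList (x :: rest.takeWhile (· == x)) = [x] := ofList_const htw
      rw [pvProcGroup, if_neg (by
        rw [hset]
        simp [PySem.Set.equal, PySem.Set.issubset, hx])]
      rw [enum_const]
      show ("B-" ++ x) :: _ ++ _ = pvIobPass (x :: (_ ++ _)) none
      rw [pvIobPass, if_neg hx, if_neg (by simp), pass_const htw hx, pass_shift hdw]
      simp

-- ===== VERDICT (by name: the statement is the Claim_ definition above) =====
theorem get_iob_labels_spec : Claim_equal_get_iob_labels := by
  intro xs _ _
  show get_iob_labels xs = get_iob_labels_alt xs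
  unfold get_iob_labels get_iob_labels_alt
  have hfold : ∀ (gs : List (List String)) (acc : List String),
      gs.foldl (fun acc group =>
        if PySem.Set.equal (PySem.Set.ofList group) (PySem.Set.ofList ["O"]) then
          acc ++ group
        else
          acc ++ (PySem.List.enumerate group).map decide_iob_prefix) acc
      = acc ++ gs.flatMap pvProcGroup := by
    intro gs acc
    have hfun : (fun (acc : List String) group =>
        if PySem.Set.equal (PySem.Set.ofList group) (PySem.Set.ofList ["O"]) then
          acc ++ group
        else
          acc ++ (PySem.List.enumerate group).map decide_iob_prefix)
        = (fun acc group => acc ++ pvProcGroup group) := by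
      funext a b
      simp [pvProcGroup, apply_ite (a ++ ·)]
    rw [hfun, PySem.List.foldl_append_eq_flatMap]
  simp only [hfold, List.nil_append, main_lemma]
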